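-- pv_equiv track=rewrite | github.com/Matsumoto906/Python | 練習/TA001/86.py | f
-- ===== SOURCE A (Python) =====
-- def f(x):
--     x=str(x)
--     n=0
--     for i in x:
--         n+=int(i)*int(i)
--     if n==4:
--         return False
--     elif n==1:
--         return True
--     else:
--         return f(n)
-- ===== SOURCE B (Python) =====
-- def f(x):
--     # arithmetic digit extraction instead of str()/int() round-trips
--     def dss(v):
--         s = 0
--         while v > 0:
--             d = v % 10
--             v //= 10
--             s += d * d
--         return s
--     n = dss(x)
--     while n != 1 and n != 4:
--         n = dss(n)
--     return n == 1
-- ===== Notes on version B (the rewrite author's own statement) =====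
-- stated objective: alternative
-- what changed: B replaces A's string round-trip (str(x) then int(c) per character) and self-recursion by pure arithmetic digit extraction (% 10, // 10) inside an explicit iterative loop that runs until the digit-square sum reaches 1 or 4.
-- outside the precondition, e.g. on f(0): A raises RecursionError, B does not finish within the time limit; on f(-3): A raises ValueError, B does not finish within the time limit
import Mathlib
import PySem

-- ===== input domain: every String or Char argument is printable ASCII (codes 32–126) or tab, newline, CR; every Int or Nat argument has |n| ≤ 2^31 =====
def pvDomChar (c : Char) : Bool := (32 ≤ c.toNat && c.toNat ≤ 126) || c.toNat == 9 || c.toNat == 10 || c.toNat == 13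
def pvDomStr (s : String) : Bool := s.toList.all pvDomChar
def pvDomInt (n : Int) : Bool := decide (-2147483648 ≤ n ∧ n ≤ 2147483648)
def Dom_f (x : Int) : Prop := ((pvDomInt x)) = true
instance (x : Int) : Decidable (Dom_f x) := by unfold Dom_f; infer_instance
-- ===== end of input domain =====

-- B computes the digit-square sum arithmetically (% 10, // 10) in an explicit loop
-- instead of A's str()/int() per-character round-trip and self-recursion.

-- ===== PORT A =====
-- the 'for i in x: n += int(i)*int(i)' loop; int(i) on a one-char string is
-- PySem.Int.ofChars? [c]; '.getD 0' is only reachable on the '-' sign char of a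
-- negative x, which Pre_f excludes (Python raises ValueError there)
def sumStrA (s : List Char) : Int :=
  s.foldl (fun n c => n + ((PySem.Int.ofChars? [c]).getD 0) * ((PySem.Int.ofChars? [c]).getD 0)) 0

-- A's self-recursion 'return f(n)', guarded by fuel for totality (one unit per
-- recursive call; ample for every terminating run on Dom)
def fAux : Nat → Int → Bool
  | 0, _ => false
  | fuel + 1, x =>
    let n := sumStrA (PySem.Int.toStr x).toList
    if n = 4 then false
    else if n = 1 then true
    else fAux fuel n

def f (x : Int) : Bool := fAux 1001 x

-- ===== PORT B =====
-- Source B's inner 'while v > 0: d = v % 10; v //= 10; s += d*d'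
def sumsqLoop (v s : Int) : Int :=
  if 0 < v then
    sumsqLoop (PySem.Int.floordiv v 10) (s + PySem.Int.mod v 10 * PySem.Int.mod v 10)
  else s
termination_by v.toNat
decreasing_by
  rw [PySem.Int.floordiv_eq_ediv_of_pos (by omega)]
  omega

-- Source B's outer 'while n != 1 and n != 4: n = dss(n)', fuel-guarded for totality
def fAltLoop : Nat → Int → Int
  | 0, n => n
  | fuel + 1, n => if n ≠ 1 ∧ n ≠ 4 then fAltLoop fuel (sumsqLoop n 0) else n

def f_alt (x : Int) : Bool := decide (fAltLoop 1000 (sumsqLoop x 0) = 1)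

-- ===== PRECONDITION & SPEC =====
-- Pre_f excludes exactly the inputs on which A raises: x < 0 (ValueError from
-- int('-')) and x = 0 (the recursion f(0) never terminates: RecursionError).
def Pre_f (x : Int) : Prop := 1 ≤ x
instance (x : Int) : Decidable (Pre_f x) := by unfold Pre_f; infer_instance
def pvWitness_f : Int := (7)

def Spec_f (x : Int) (out : Bool) : Prop := out = f_alt x
instance (x : Int) (out : Bool) : Decidable (Spec_f x out) := by unfold Spec_f; infer_instance

-- ===== CLAIM (what is proved, stated in full; the proofs are below) =====
def Claim_equal_f : Prop := ∀ (x : Int), Dom_f x → Pre_f x → Spec_f x (f x)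

-- ===== LEMMAS AND PROOFS =====

-- the common digit-square-sum value, most-significant-digit recursion
def dsq (n : Nat) : Int :=
  if n < 10 then (n : Int) * n
  else dsq (n / 10) + ((n % 10 : Nat) : Int) * ((n % 10 : Nat) : Int)
decreasing_by exact Nat.div_lt_self (by omega) (by omega)

-- decimal digit characters of n, most-significant first
def strDigits (n : Nat) : List Char :=
  if n < 10 then [Nat.digitChar n]
  else strDigits (n / 10) ++ [Nat.digitChar (n % 10)]
decreasing_by exact Nat.div_lt_self (by omega) (by omega)

lemma toDigitsCore_eq : ∀ (fuel n : Nat) (ds : List Char), n < fuel →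
    Nat.toDigitsCore 10 fuel n ds = strDigits n ++ ds := by
  intro fuel
  induction fuel with
  | zero => intro n ds h; omega
  | succ k ih =>
    intro n ds h
    rw [Nat.toDigitsCore, strDigits]
    by_cases h10 : n < 10
    · have : n / 10 = 0 := Nat.div_eq_of_lt h10
      simp [this, h10, Nat.mod_eq_of_lt h10]
    · have hne : ¬ n / 10 = 0 := by
        intro hz; exact h10 (by omega)
      simp only [hne, h10]
      rw [ih (n / 10) _ (by omega)]
      simp

lemma toDigits_eq (n : Nat) : Nat.toDigits 10 n = strDigits n := by
  rw [Nat.toDigits, toDigitsCore_eq (n + 1) n [] (by omega)]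
  simp

lemma digitChar_val (d : Nat) (h : d < 10) :
    (PySem.Int.ofChars? [Nat.digitChar d]).getD 0 = (d : Int) := by
  interval_cases d <;> rfl

lemma dsq_rec (n : Nat) :
    dsq n = dsq (n / 10) + ((n % 10 : Nat) : Int) * ((n % 10 : Nat) : Int) := by
  by_cases h : n < 10
  · rw [dsq, if_pos h, dsq, if_pos (by omega : n / 10 < 10)]
    rw [Nat.div_eq_of_lt h, Nat.mod_eq_of_lt h]
    simp
  · rw [dsq, if_neg h]

lemma foldl_strDigits (n : Nat) : ∀ acc : Int,
    (strDigits n).foldl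
      (fun m c => m + ((PySem.Int.ofChars? [c]).getD 0) * ((PySem.Int.ofChars? [c]).getD 0))
      acc = acc + dsq n := by
  induction n using Nat.strong_induction_on with
  | _ n ih =>
    intro acc
    rw [strDigits]
    by_cases h : n < 10
    · rw [if_pos h, dsq, if_pos h]
      simp [digitChar_val n h]
    · rw [if_neg h, List.foldl_append,
        ih (n / 10) (Nat.div_lt_self (by omega) (by omega)) acc]
      simp only [List.foldl_cons, List.foldl_nil, digitChar_val (n % 10) (by omega)]
      rw [dsq_rec n]
      push_cast
      ring

lemma sumStrA_eq (x : Int) (hx : 0 ≤ x) :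
    sumStrA (PySem.Int.toStr x).toList = dsq x.toNat := by
  rw [sumStrA, PySem.Int.toList_toStr, PySem.Int.toChars, if_neg (by omega)]
  rw [toDigits_eq, foldl_strDigits]
  simp

lemma sumsqLoop_eq : ∀ (k : Nat) (v : Int), 0 ≤ v → v.toNat ≤ k → ∀ s : Int,
    sumsqLoop v s = s + dsq v.toNat := by
  intro k
  induction k with
  | zero =>
    intro v hv hle s
    have hz : v = 0 := by omega
    subst hz
    rw [sumsqLoop]
    simp [dsq]
  | succ k ih =>
    intro v hv hle s
    by_cases h : 0 < v
    · rw [sumsqLoop, if_pos h,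
        PySem.Int.floordiv_eq_ediv_of_pos (by omega : (0:Int) < 10),
        PySem.Int.mod_eq_emod_of_pos (by omega : (0:Int) < 10),
        ih (v / 10) (by omega) (by omega)]
      rw [dsq_rec v.toNat]
      have h1 : (v / 10).toNat = v.toNat / 10 := by omega
      have h2 : ((v.toNat % 10 : Nat) : Int) = v % 10 := by omega
      rw [h1, h2]
      ring
    · have hz : v = 0 := by omega
      subst hz
      rw [sumsqLoop]
      simp [dsq]

lemma dsq_pos (n : Nat) (h : 1 ≤ n) : 1 ≤ dsq n := by
  induction n using Nat.strong_induction_on with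
  | _ n ih =>
    rw [dsq]
    by_cases h10 : n < 10
    · rw [if_pos h10]
      have : 1 ≤ (n : Int) := by omega
      nlinarith
    · rw [if_neg h10]
      have h1 : 1 ≤ dsq (n / 10) :=
        ih (n / 10) (Nat.div_lt_self (by omega) (by omega)) (by omega)
      have h2 : (0 : Int) ≤ ((n % 10 : Nat) : Int) * ((n % 10 : Nat) : Int) :=
        mul_nonneg (by omega) (by omega)
      omega

lemma step_eq (x : Int) (hx : 1 ≤ x) :
    sumStrA (PySem.Int.toStr x).toList = sumsqLoop x 0 := by
  rw [sumStrA_eq x (by omega), sumsqLoop_eq x.toNat x (by omega) (by omega) 0, zero_add]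

lemma step_pos (x : Int) (hx : 1 ≤ x) : 1 ≤ sumsqLoop x 0 := by
  rw [sumsqLoop_eq x.toNat x (by omega) (by omega) 0, zero_add]
  exact dsq_pos x.toNat (by omega)

lemma main_eq : ∀ (fuel : Nat) (x : Int), 1 ≤ x →
    fAux (fuel + 1) x = decide (fAltLoop fuel (sumsqLoop x 0) = 1) := by
  intro fuel
  induction fuel with
  | zero =>
    intro x hx
    rw [fAux.eq_2, step_eq x hx]
    set n := sumsqLoop x 0 with hn
    have hn1 : 1 ≤ n := step_pos x hx
    by_cases h4 : n = 4
    · simp [fAltLoop, h4]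
    · by_cases h1 : n = 1
      · simp [fAltLoop, h1]
      · simp [fAltLoop, h4, h1, fAux]
  | succ k ih =>
    intro x hx
    rw [fAux.eq_2, step_eq x hx]
    set n := sumsqLoop x 0 with hn
    have hn1 : 1 ≤ n := step_pos x hx
    by_cases h4 : n = 4
    · simp [fAltLoop, h4]
    · by_cases h1 : n = 1
      · simp [fAltLoop, h1]
      · rw [if_neg h4, if_neg h1, ih n hn1, fAltLoop.eq_2, if_pos ⟨h1, h4⟩]

-- ===== VERDICT (by name: the statement is the Claim_ definition above) =====
theorem f_spec : Claim_equal_f := by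
  intro x _ hpre
  unfold Spec_f f f_alt
  exact main_eq 1000 x hpre
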